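-- pv_equiv track=rewrite | github.com/kupuguy/aoc2021 | src/day14.py | part1
-- ===== SOURCE A (Python) =====
-- from itertools import pairwise
-- from collections import Counter, defaultdict
--
-- def part1(data):
--     template, rules = data
--     for step in range(10):
--         template = "".join(
--             [rules.get(pair, pair[0]) for pair in pairwise(template)] + [template[-1]]
--         )
--
--     count = Counter(template).most_common()
--     return count[0][1] - count[-1][1]
-- ===== SOURCE B (Python) =====
-- def part1(data):
--     template, rules = data
--     chars = list(template)
--     for _ in range(9):
--         nxt = []
--         for i in range(len(chars) - 1):
--             nxt.extend(rules.get((chars[i], chars[i + 1]), chars[i]))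
--         nxt.append(chars[-1])
--         chars = nxt
--     counts = {chars[-1]: 1}
--     for i in range(len(chars) - 1):
--         for c in rules.get((chars[i], chars[i + 1]), chars[i]):
--             counts[c] = counts.get(c, 0) + 1
--     return max(counts.values()) - min(counts.values())
-- ===== Notes on version B (the rewrite author's own statement) =====
-- stated objective: alternative
-- what changed: B runs only 9 expansion steps and accumulates the final character counts directly from the 9th string's adjacent pairs (the largest, 10th string is never materialized), then returns max-min of a plain counts dict instead of sorting with Counter.most_common; the general (possibly empty or multi-char) replacement strings rule out the classic pair-counting shortcut, so the asymptotic cost is unchanged.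
-- outside the precondition, e.g. on part1(('', {})): A raises IndexError, B raises IndexError
import Mathlib
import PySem

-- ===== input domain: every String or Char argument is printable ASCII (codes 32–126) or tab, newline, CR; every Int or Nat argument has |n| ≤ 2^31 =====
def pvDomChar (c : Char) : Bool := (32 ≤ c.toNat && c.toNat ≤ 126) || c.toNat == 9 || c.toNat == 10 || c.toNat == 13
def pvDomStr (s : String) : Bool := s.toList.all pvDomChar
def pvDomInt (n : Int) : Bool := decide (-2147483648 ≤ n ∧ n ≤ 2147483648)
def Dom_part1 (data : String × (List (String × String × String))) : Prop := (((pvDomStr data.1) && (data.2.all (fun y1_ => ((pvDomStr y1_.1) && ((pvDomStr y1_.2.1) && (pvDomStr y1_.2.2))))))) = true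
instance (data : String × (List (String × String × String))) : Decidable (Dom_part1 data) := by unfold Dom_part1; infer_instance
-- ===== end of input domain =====

-- B runs 9 expansion steps and counts the 10th string's characters straight off the 9th
-- string's pairs, returning max-min of the counts instead of sorting with most_common.

-- ===== PORT A =====
-- rules.get(pair, pair[0]) : the replacement string for the pair, default the first char
def pvRepA (rules : List (String × String × String)) (a b : Char) : List Char :=
  match rules.find? (fun e => e.1.toList == [a] && e.2.1.toList == [b]) with
  | some e => e.2.2.toList
  | none => [a]

-- [template[-1]] ; Python raises IndexError on an empty string (excluded by Pre_part1)
def pvLastA (t : List Char) : List Char :=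
  match PySem.List.pyGet? t (-1) with
  | some c => [c]
  | none => []

-- "".join([rules.get(pair, pair[0]) for pair in pairwise(template)] + [template[-1]])
def pvStepA (rules : List (String × String × String)) (t : List Char) : List Char :=
  ((t.zip t.tail).map (fun p => pvRepA rules p.1 p.2)).flatten ++ pvLastA t

def part1 (data : String × (List (String × String × String))) : Int :=
  let t := (List.range 10).foldl (fun t _ => pvStepA data.2 t) data.1.toList
  let mc := PySem.List.sorted (PySem.Dict.counter t).items (fun p => p.2) true
  match PySem.List.pyGet? mc 0, PySem.List.pyGet? mc (-1) with
  | some p, some q => p.2 - q.2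
  | _, _ => 0

-- ===== PORT B =====
-- rules.get((chars[i], chars[i+1]), chars[i]) in B
def pvRepB (rules : List (String × String × String)) (a b : Char) : List Char :=
  match rules.find? (fun e => e.1.toList == [a] && e.2.1.toList == [b]) with
  | some e => e.2.2.toList
  | none => [a]

-- chars[-1] ; Python raises IndexError on an empty list (excluded by Pre_part1)
def pvLastB (t : List Char) : List Char :=
  match PySem.List.pyGet? t (-1) with
  | some c => [c]
  | none => []

-- the inner index loop: for i in range(len(chars)-1): nxt.extend(rules.get(...))
def pvStepB (rules : List (String × String × String)) (t : List Char) : List Char :=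
  ((PySem.List.pyRange 0 ((t.length : Int) - 1) 1).foldl
    (fun acc i => acc ++ pvRepB rules (PySem.List.pyGetD t i ' ') (PySem.List.pyGetD t (i + 1) ' ')) [])
  ++ pvLastB t

-- counts = {chars[-1]: 1}; then count every char of every replacement string
def pvCountB (rules : List (String × String × String)) (t : List Char) : PySem.Dict Char Int :=
  (PySem.List.pyRange 0 ((t.length : Int) - 1) 1).foldl
    (fun d i => (pvRepB rules (PySem.List.pyGetD t i ' ') (PySem.List.pyGetD t (i + 1) ' ')).foldl
        (fun d c => d.insert c (d.getD c 0 + 1)) d)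
    (match PySem.List.pyGet? t (-1) with
     | some c => PySem.Dict.empty.insert c 1
     | none => PySem.Dict.empty)

def part1_alt (data : String × (List (String × String × String))) : Int :=
  let t := (List.range 9).foldl (fun t _ => pvStepB data.2 t) data.1.toList
  let counts := pvCountB data.2 t
  match PySem.List.max? counts.values (fun v => v) with
  | none => 0
  | some M =>
    match PySem.List.min? counts.values (fun v => v) with
    | none => 0
    | some m => M - m

-- ===== PRECONDITION & SPEC =====
-- Pre_ excludes only the empty template, on which A raises IndexError (template[-1]).
def Pre_part1 (data : String × (List (String × String × String))) : Prop := data.1 ≠ ""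
instance (data : String × (List (String × String × String))) : Decidable (Pre_part1 data) := by unfold Pre_part1; infer_instance
def pvWitness_part1 : (String × (List (String × String × String))) := ("NNCB", [("N", "N", "C"), ("N", "C", "B"), ("C", "B", "H")])

def Spec_part1 (data : String × (List (String × String × String))) (out : Int) : Prop := out = part1_alt data
instance (data : String × (List (String × String × String))) (out : Int) : Decidable (Spec_part1 data out) := by unfold Spec_part1; infer_instance

-- ===== CLAIM (what is proved, stated in full; the proofs are below) =====
def Claim_equal_part1 : Prop := ∀ (data : String × (List (String × String × String))), Dom_part1 data → Pre_part1 data → Spec_part1 data (part1 data)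

-- ===== LEMMAS AND PROOFS =====

theorem pv_rep_eq : @pvRepB = @pvRepA := rfl

theorem pv_last_eq : @pvLastB = @pvLastA := rfl

-- the index loop 'for i in range(len(t)-1)' enumerates exactly the adjacent pairs zip(t, t[1:])
theorem pv_pairs_map {beta : Type} (t : List Char) (f : Char → Char → beta) :
    (PySem.List.pyRange 0 ((t.length : Int) - 1) 1).map
      (fun i => f (PySem.List.pyGetD t i ' ') (PySem.List.pyGetD t (i + 1) ' '))
      = (t.zip t.tail).map (fun p => f p.1 p.2) := by
  apply List.ext_getElem
  · simp [PySem.List.length_pyRange_one, List.length_zip]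
  · intro k h1 h2
    have hk : k + 1 < t.length := by
      have := h1
      simp [PySem.List.length_pyRange_one] at this
      omega
    simp only [List.getElem_map, PySem.List.getElem_pyRange_one, List.getElem_zip,
      List.getElem_tail]
    have e0 : (0 : Int) + (k : Int) = ((k : Nat) : Int) := by omega
    rw [e0]
    have e1 : ((k : Nat) : Int) + 1 = (((k + 1 : Nat)) : Int) := by push_cast; ring
    rw [e1]
    rw [PySem.List.pyGetD_natCast, PySem.List.pyGetD_natCast,
        List.getD_eq_getElem t ' ' (by omega), List.getD_eq_getElem t ' ' (by omega)]

-- B's expansion step computes exactly A's step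
theorem pv_stepB_eq (r : List (String × String × String)) (t : List Char) :
    pvStepB r t = pvStepA r t := by
  unfold pvStepB pvStepA
  rw [pv_rep_eq, pv_last_eq, PySem.List.foldl_append_eq_flatMap]
  simp only [List.nil_append, List.flatMap_def]
  rw [pv_pairs_map t (fun a b => pvRepA r a b)]

theorem pv_stepA_ne (r : List (String × String × String)) (t : List Char) (h : t ≠ []) :
    pvStepA r t ≠ [] := by
  unfold pvStepA pvLastA
  rw [PySem.List.pyGet?_neg_one, List.getLast?_eq_some_getLast h]
  simp

theorem pv_fold_ne (r : List (String × String × String)) (n : Nat) (x : List Char) (h : x ≠ []) :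
    (List.range n).foldl (fun t _ => pvStepA r t) x ≠ [] := by
  induction n with
  | zero => simpa
  | succ n ih =>
    rw [List.range_succ, List.foldl_append]
    exact pv_stepA_ne r _ ih

-- B's counting pass is Counter of (last char, then all replacement strings in order)
theorem pv_countB_eq (r : List (String × String × String)) (t : List Char) :
    pvCountB r t
      = PySem.Dict.counter (pvLastA t ++ ((t.zip t.tail).map (fun p => pvRepA r p.1 p.2)).flatten) := by
  unfold pvCountB pvLastA
  rw [pv_rep_eq]
  rw [← List.foldl_map]
  rw [pv_pairs_map t (fun a b => pvRepA r a b)]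
  rw [← List.foldl_flatten]
  cases hg : PySem.List.pyGet? t (-1) with
  | none =>
    simp only [List.nil_append]
    simp [PySem.Dict.counter, PySem.Dict.modify]
  | some c =>
    simp only [List.cons_append, List.nil_append]
    simp [PySem.Dict.counter, PySem.Dict.modify, PySem.Dict.getD_empty]

-- in a list pairwise-sorted downwards on key, the last element has minimal key
theorem pv_pairwise_getLast {alpha : Type} (key : alpha → Int) (l : List alpha)
    (h : l.Pairwise (fun a b => key b ≤ key a)) (hne : l ≠ []) :
    ∀ y ∈ l, key (l.getLast hne) ≤ key y := by
  induction l with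
  | nil => exact absurd rfl hne
  | cons a tl ih =>
    intro y hy
    cases tl with
    | nil =>
      simp at hy
      subst hy
      simp
    | cons b tl' =>
      have hpair := h
      rw [List.pairwise_cons] at hpair
      have hlast : (a :: b :: tl').getLast (by simp) = (b :: tl').getLast (by simp) := by
        simp [List.getLast]
      rw [hlast]
      rcases List.mem_cons.mp hy with rfl | hy'
      · have hmem : (b :: tl').getLast (by simp) ∈ b :: tl' := List.getLast_mem _
        exact hpair.1 _ hmem
      · exact ih hpair.2 (by simp) y hy'

-- ===== VERDICT (by name: the statement is the Claim_ definition above) =====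
theorem part1_spec : Claim_equal_part1 := by
  intro data _hdom hpre
  unfold Spec_part1 part1 part1_alt
  have ht0 : data.1.toList ≠ [] := by
    intro h
    exact hpre (by rwa [← String.toList_eq_nil_iff])
  have hfoldB : (List.range 9).foldl (fun t _ => pvStepB data.2 t) data.1.toList
      = (List.range 9).foldl (fun t _ => pvStepA data.2 t) data.1.toList := by
    simp only [pv_stepB_eq]
  set t9 := (List.range 9).foldl (fun t _ => pvStepA data.2 t) data.1.toList with ht9
  have h9 : t9 ≠ [] := pv_fold_ne data.2 9 data.1.toList ht0
  have hsplit : (List.range 10).foldl (fun t _ => pvStepA data.2 t) data.1.toList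
      = pvStepA data.2 t9 := by
    rw [show (10 : Nat) = 9 + 1 from rfl, List.range_succ, List.foldl_append]
    simp only [List.foldl_cons, List.foldl_nil]
    rw [← ht9]
  simp only [hfoldB, hsplit, pv_countB_eq]
  have hlastA : pvLastA t9 = [t9.getLast h9] := by
    unfold pvLastA
    rw [PySem.List.pyGet?_neg_one, List.getLast?_eq_some_getLast h9]
  set c9 := t9.getLast h9 with hc9
  set flat := ((t9.zip t9.tail).map (fun p => pvRepA data.2 p.1 p.2)).flatten with hflat
  have hxs : pvStepA data.2 t9 = flat ++ [c9] := by
    unfold pvStepA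
    rw [hlastA]
  rw [hxs, hlastA]
  -- abbreviations: A's final string xs, B's counted list L — same multiset of characters
  set xs := flat ++ [c9] with hxsdef
  set L := ([c9] : List Char) ++ flat with hLdef
  have hcnt : ∀ a : Char, L.count a = xs.count a := by
    intro a
    simp [hxsdef, hLdef, List.count_append, List.count_cons]
  have hmemLxs : ∀ a : Char, a ∈ L ↔ a ∈ xs := by
    intro a
    simp [hxsdef, hLdef, or_comm]
  have hc9xs : c9 ∈ xs := by simp [hxsdef]
  -- A side: items of Counter(xs) and its descending sort mc
  have hitems : (PySem.Dict.counter xs).items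
      = (PySem.Set.ofList xs).map (fun k => (k, (xs.count k : Int))) := PySem.Dict.items_counter xs
  set mc := PySem.List.sorted (PySem.Dict.counter xs).items (fun p => p.2) true with hmc
  have hc9item : (c9, (xs.count c9 : Int)) ∈ (PySem.Dict.counter xs).items := by
    rw [hitems]
    exact List.mem_map_of_mem ((PySem.Set.mem_ofList xs c9).mpr hc9xs)
  have hc9mc : (c9, (xs.count c9 : Int)) ∈ mc := by
    rw [hmc, PySem.List.mem_sorted]
    exact hc9item
  have hmcne : mc ≠ [] := List.ne_nil_of_mem hc9mc
  obtain ⟨p0, mtl, hmceq⟩ := List.exists_cons_of_ne_nil hmcne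
  -- A's two lookups: head and last of mc
  have hget0 : PySem.List.pyGet? mc 0 = some p0 := by
    rw [hmceq]
    exact PySem.List.pyGet?_zero_cons p0 mtl
  have hgetlast : PySem.List.pyGet? mc (-1) = some (mc.getLast hmcne) := by
    rw [PySem.List.pyGet?_neg_one, List.getLast?_eq_some_getLast hmcne]
  set q0 := mc.getLast hmcne with hq0
  rw [hget0, hgetlast]
  -- B side: the values list of Counter(L) and its max/min
  have hvals : (PySem.Dict.counter L).values
      = (PySem.Set.ofList L).map (fun k => (L.count k : Int)) := by
    unfold PySem.Dict.values
    rw [PySem.Dict.items_counter L, List.map_map]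
    rfl
  have hc9L : c9 ∈ L := by simp [hLdef]
  have hvne : (PySem.Dict.counter L).values ≠ [] := by
    rw [hvals]
    intro hnil
    have : c9 ∈ PySem.Set.ofList L := (PySem.Set.mem_ofList L c9).mpr hc9L
    rw [List.map_eq_nil_iff.mp hnil] at this
    simp at this
  obtain ⟨M, hM⟩ : ∃ M, PySem.List.max? (PySem.Dict.counter L).values (fun v => v) = some M := by
    cases hMx : PySem.List.max? (PySem.Dict.counter L).values (fun v => v) with
    | none => exact absurd ((PySem.List.max?_eq_none_iff _ _).mp hMx) hvne
    | some M => exact ⟨M, rfl⟩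
  obtain ⟨m, hm⟩ : ∃ m, PySem.List.min? (PySem.Dict.counter L).values (fun v => v) = some m := by
    cases hmx : PySem.List.min? (PySem.Dict.counter L).values (fun v => v) with
    | none =>
      rw [PySem.List.min?_eq_none_iff] at hmx
      exact absurd hmx hvne
    | some m => exact ⟨m, rfl⟩
  rw [hM, hm]
  -- characterize p0, q0, M, m as character counts and compare
  have hsortedeq : PySem.List.sorted (PySem.Dict.counter xs).items (fun p => p.2) true = p0 :: mtl := by
    rw [← hmc]; exact hmceq
  have hheadmax : ∀ y ∈ (PySem.Dict.counter xs).items, y.2 ≤ p0.2 :=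
    PySem.List.key_head_sorted_rev_ge _ _ hsortedeq
  have hlastmin : ∀ y ∈ mc, q0.2 ≤ y.2 := by
    have hpw : mc.Pairwise (fun a b => b.2 ≤ a.2) := by
      rw [hmc]
      exact PySem.List.sorted_pairwise_rev _ _
    exact pv_pairwise_getLast (fun p => p.2) mc hpw hmcne
  have hp0mem : p0 ∈ (PySem.Dict.counter xs).items := by
    have : p0 ∈ mc := by rw [hmceq]; exact List.mem_cons_self
    rwa [hmc, PySem.List.mem_sorted] at this
  have hq0mem : q0 ∈ (PySem.Dict.counter xs).items := by
    have : q0 ∈ mc := List.getLast_mem hmcne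
    rwa [hmc, PySem.List.mem_sorted] at this
  rw [hitems] at hp0mem hq0mem
  obtain ⟨k0, hk0, hp0eq⟩ := List.mem_map.mp hp0mem
  obtain ⟨k2, hk2, hq0eq⟩ := List.mem_map.mp hq0mem
  have hp0snd : p0.2 = (xs.count k0 : Int) := by rw [← hp0eq]
  have hq0snd : q0.2 = (xs.count k2 : Int) := by rw [← hq0eq]
  have hk0xs : k0 ∈ xs := (PySem.Set.mem_ofList xs k0).mp hk0
  have hk2xs : k2 ∈ xs := (PySem.Set.mem_ofList xs k2).mp hk2
  -- a count of any char of xs appears among B's values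
  have hcntval : ∀ k, k ∈ xs → ((L.count k : Int)) ∈ (PySem.Dict.counter L).values := by
    intro k hk
    rw [hvals]
    exact List.mem_map_of_mem ((PySem.Set.mem_ofList L k).mpr ((hmemLxs k).mpr hk))
  -- and any of B's values is a count of a char of xs, hence an item of A's counter
  have hvalitem : ∀ v, v ∈ (PySem.Dict.counter L).values →
      ∃ k, k ∈ xs ∧ v = (xs.count k : Int) := by
    intro v hv
    rw [hvals] at hv
    obtain ⟨k, hkmem, hveq⟩ := List.mem_map.mp hv
    exact ⟨k, (hmemLxs k).mp ((PySem.Set.mem_ofList L k).mp hkmem), by rw [← hveq, hcnt]⟩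
  have hMmax : ∀ y ∈ (PySem.Dict.counter L).values, y ≤ M := PySem.List.max?_isMax hM
  have hmmin : ∀ y ∈ (PySem.Dict.counter L).values, m ≤ y := PySem.List.min?_isMin hm
  -- p0.2 = M
  have hpM : p0.2 = M := by
    obtain ⟨k1, hk1xs, hMeq⟩ := hvalitem M (PySem.List.max?_mem hM)
    have h1 : p0.2 ≤ M := by
      have := hMmax _ (hcntval k0 hk0xs)
      rw [hcnt] at this
      rw [hp0snd]
      exact this
    have h2 : M ≤ p0.2 := by
      have := hheadmax (k1, (xs.count k1 : Int)) (by
        rw [hitems]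
        exact List.mem_map_of_mem ((PySem.Set.mem_ofList xs k1).mpr hk1xs))
      rw [hMeq]
      exact this
    omega
  -- q0.2 = m
  have hqm : q0.2 = m := by
    obtain ⟨k3, hk3xs, hmeq⟩ := hvalitem m (PySem.List.min?_mem hm)
    have h1 : m ≤ q0.2 := by
      have := hmmin _ (hcntval k2 hk2xs)
      rw [hcnt] at this
      rw [hq0snd]
      exact this
    have h2 : q0.2 ≤ m := by
      have hmemmc : (k3, (xs.count k3 : Int)) ∈ mc := by
        rw [hmc, PySem.List.mem_sorted, hitems]
        exact List.mem_map_of_mem ((PySem.Set.mem_ofList xs k3).mpr hk3xs)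
      have := hlastmin _ hmemmc
      rw [hmeq]
      exact this
    omega
  show p0.2 - q0.2 = M - m
  rw [hpM, hqm]
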